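-- pv_equiv track=rewrite | github.com/spack/spack | lib/spack/spack/compilers/flags.py | tokenize_flags
-- ===== SOURCE A (Python) =====
-- from typing import List, Tuple
--
-- def tokenize_flags(flags_values: str, propagate: bool = False) -> List[Tuple[str, bool]]:
--     """Given a compiler flag specification as a string, this returns a list
--     where the entries are the flags. For compiler options which set values
--     using the syntax "-flag value", this function groups flags and their
--     values together. Any token not preceded by a "-" is considered the
--     value of a prior flag."""
--     tokens = flags_values.split()
--     if not tokens:
--         return []
--     flag = tokens[0]
--     flags_with_propagation = []
--     for token in tokens[1:]:
--         if not token.startswith("-"):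
--             flag += " " + token
--         else:
--             flags_with_propagation.append((flag, propagate))
--             flag = token
--     flags_with_propagation.append((flag, propagate))
--     return flags_with_propagation
-- ===== SOURCE B (Python) =====
-- from typing import List, Tuple
-- from itertools import takewhile, dropwhile
--
-- def tokenize_flags(flags_values: str, propagate: bool = False) -> List[Tuple[str, bool]]:
--     """Group compiler flags with their value tokens by structural recursion:
--     a group is the head token plus the run of following non-'-' tokens
--     (taken with a span), then recurse on the remainder."""
--     def is_value(tok):
--         return not tok.startswith("-")
--
--     def groups(tokens):
--         if not tokens:
--             return []
--         head, tail = tokens[0], tokens[1:]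
--         vals = list(takewhile(is_value, tail))
--         rest = list(dropwhile(is_value, tail))
--         return [(" ".join([head] + vals), propagate)] + groups(rest)
--
--     return groups(flags_values.split())
-- ===== Notes on version B (the rewrite author's own statement) =====
-- stated objective: alternative
-- what changed: Replaces A's left-to-right fold that mutates a growing current-group string and an accumulator list with a structural recursion that spans each group at once (head token plus the takewhile-run of non-dash value tokens, joined with spaces) and recurses on the dropwhile remainder.
import Mathlib
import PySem

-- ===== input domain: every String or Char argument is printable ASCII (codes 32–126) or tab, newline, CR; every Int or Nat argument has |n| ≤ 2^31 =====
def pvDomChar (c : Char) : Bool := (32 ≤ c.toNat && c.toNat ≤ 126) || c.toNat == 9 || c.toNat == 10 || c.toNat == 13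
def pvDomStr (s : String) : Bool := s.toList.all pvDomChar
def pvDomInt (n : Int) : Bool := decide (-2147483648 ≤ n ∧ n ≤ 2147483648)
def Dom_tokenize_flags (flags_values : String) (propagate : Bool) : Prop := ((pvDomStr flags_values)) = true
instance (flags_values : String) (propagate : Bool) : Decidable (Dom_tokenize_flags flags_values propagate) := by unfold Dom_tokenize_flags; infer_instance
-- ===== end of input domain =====

-- B replaces A's left-to-right fold (growing 'flag' string + accumulator list) with a
-- structural recursion that spans each whole group at once (head token plus the
-- takeWhile-run of non-'-' value tokens) and recurses on the dropWhile remainder;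
-- same O(n) cost, different decomposition (objective: alternative).

-- ===== PORT A =====
-- literal transliteration of A: split, then a left fold over tokens[1:] carrying
-- the current flag string and the appended list.
def tokenize_flags (flags_values : String) (propagate : Bool) : List (String × Bool) :=
  let tokens := PySem.Str.split₀ flags_values
  match tokens with
  | [] => []
  | t0 :: rest =>
    let st := rest.foldl (fun (st : String × List (String × Bool)) token =>
      if !(PySem.Str.startswith token "-") then (st.1 ++ " " ++ token, st.2)
      else (token, st.2 ++ [(st.1, propagate)])) (t0, [])
    st.2 ++ [(st.1, propagate)]

-- ===== PORT B =====
-- transliteration of B's helpers: is_value, and the recursive 'groups' that spans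
-- each group with takeWhile/dropWhile on the tail and recurses on the remainder.
def pvIsValue (tok : String) : Bool := !(PySem.Str.startswith tok "-")

def pvGroups (propagate : Bool) : List String → List (String × Bool)
  | [] => []
  | head :: tail =>
    let vals := tail.takeWhile pvIsValue
    let rest := tail.dropWhile pvIsValue
    (PySem.Str.join " " (head :: vals), propagate) :: pvGroups propagate rest
termination_by ts => ts.length
decreasing_by
  exact Nat.lt_succ_of_le (List.length_dropWhile_le pvIsValue tail)

def tokenize_flags_alt (flags_values : String) (propagate : Bool) : List (String × Bool) :=
  pvGroups propagate (PySem.Str.split₀ flags_values)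

-- ===== PRECONDITION & SPEC =====
def Spec_tokenize_flags (flags_values : String) (propagate : Bool) (out : List (String × Bool)) : Prop := out = tokenize_flags_alt flags_values propagate
instance (flags_values : String) (propagate : Bool) (out : List (String × Bool)) : Decidable (Spec_tokenize_flags flags_values propagate out) := by unfold Spec_tokenize_flags; infer_instance

-- ===== CLAIM =====
def Claim_equal_tokenize_flags : Prop := ∀ (flags_values : String) (propagate : Bool), Dom_tokenize_flags flags_values propagate → Spec_tokenize_flags flags_values propagate (tokenize_flags flags_values propagate)

-- ===== LEMMAS AND PROOFS =====

-- the canonical recursive description of A's grouping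
def grpRec (p : Bool) : List String → String → List (String × Bool)
  | [], flag => [(flag, p)]
  | t :: ts, flag =>
    if !(PySem.Str.startswith t "-") then grpRec p ts (flag ++ " " ++ t)
    else (flag, p) :: grpRec p ts t

theorem join_one (f : String) : PySem.Str.join " " [f] = f := by
  apply String.toList_inj.mp
  simp [PySem.Str.toList_join, PySem.Chars.join_singleton]

theorem join_two (a b : String) (l : List String) :
    PySem.Str.join " " (a :: b :: l) = PySem.Str.join " " ((a ++ " " ++ b) :: l) := by
  apply String.toList_inj.mp
  cases l with
  | nil =>
    simp [PySem.Str.toList_join, PySem.Chars.join_cons_cons, PySem.Chars.join_singleton]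
  | cons c cs =>
    simp [PySem.Str.toList_join, PySem.Chars.join_cons_cons]

theorem foldlA_eq (p : Bool) (ts : List String) (flag : String) (acc : List (String × Bool)) :
    (ts.foldl (fun (st : String × List (String × Bool)) token =>
      if !(PySem.Str.startswith token "-") then (st.1 ++ " " ++ token, st.2)
      else (token, st.2 ++ [(st.1, p)])) (flag, acc)).2
    ++ [((ts.foldl (fun (st : String × List (String × Bool)) token =>
      if !(PySem.Str.startswith token "-") then (st.1 ++ " " ++ token, st.2)
      else (token, st.2 ++ [(st.1, p)])) (flag, acc)).1, p)]
    = acc ++ grpRec p ts flag := by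
  induction ts generalizing flag acc with
  | nil => simp [grpRec]
  | cons t ts ih =>
    by_cases h : PySem.Str.startswith t "-" = true
    · simp only [List.foldl_cons, grpRec, h, Bool.not_true, Bool.false_eq_true, if_false,
        ih, List.append_assoc, List.cons_append, List.nil_append]
    · simp only [List.foldl_cons, grpRec, Bool.not_eq_true] at h ⊢
      simp only [h, Bool.not_false, if_true, ih]

theorem grpRec_eq_groups (p : Bool) (ts : List String) (flag : String) :
    grpRec p ts flag
      = (PySem.Str.join " " (flag :: ts.takeWhile pvIsValue), p)
        :: pvGroups p (ts.dropWhile pvIsValue) := by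
  induction ts generalizing flag with
  | nil =>
    simp only [List.takeWhile_nil, List.dropWhile_nil]
    rw [pvGroups]
    simp [grpRec, join_one]
  | cons t ts ih =>
    by_cases h : PySem.Str.startswith t "-" = true
    · have hv : pvIsValue t = false := by simp only [pvIsValue, h, Bool.not_true]
      simp only [grpRec, h, Bool.not_true, Bool.false_eq_true,
        List.takeWhile_cons, List.dropWhile_cons, hv, if_false, join_one]
      rw [pvGroups, ih t]
    · simp only [Bool.not_eq_true] at h
      have hv : pvIsValue t = true := by simp only [pvIsValue, h, Bool.not_false]
      simp only [grpRec, h, Bool.not_false, if_true,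
        List.takeWhile_cons, List.dropWhile_cons, hv, if_true]
      rw [join_two, ih]

-- ===== VERDICT =====
theorem tokenize_flags_spec : Claim_equal_tokenize_flags := by
  unfold Claim_equal_tokenize_flags
  intro s p _
  unfold Spec_tokenize_flags tokenize_flags tokenize_flags_alt
  cases PySem.Str.split₀ s with
  | nil => rw [pvGroups]
  | cons t0 rest =>
    show (rest.foldl (fun (st : String × List (String × Bool)) token =>
      if !(PySem.Str.startswith token "-") then (st.1 ++ " " ++ token, st.2)
      else (token, st.2 ++ [(st.1, p)])) (t0, [])).2
      ++ [((rest.foldl (fun (st : String × List (String × Bool)) token =>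
        if !(PySem.Str.startswith token "-") then (st.1 ++ " " ++ token, st.2)
        else (token, st.2 ++ [(st.1, p)])) (t0, [])).1, p)]
      = pvGroups p (t0 :: rest)
    have hA := foldlA_eq p rest t0 []
    simp only [List.nil_append] at hA
    rw [hA, grpRec_eq_groups, pvGroups]
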